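-- pv_equiv track=rewrite | github.com/carson-evans/CS-110_workspace | ipp/ipp/potentialgene.py | _isPotentialGene
-- ===== SOURCE A (Python) =====
-- def _isPotentialGene(dna):
--     ATG, TAA, TAG, TGA = "ATG", "TAA", "TAG", "TGA"
--     if len(dna) % 3 != 0:
--         return False
--     if not dna.startswith(ATG):
--         return False
--     for i in range(len(dna) - 3):
--         if i % 3 == 0:
--             codon = dna[i:i + 3]
--             if codon == TAA or codon == TAG or codon == TGA:
--                 return False
--     return dna.endswith(TAA) or dna.endswith(TAG) or dna.endswith(TGA)
-- ===== SOURCE B (Python) =====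
-- def _isPotentialGene(dna):
--     # Different algorithm: instead of slicing out every codon, use substring
--     # search (str.find) to locate, for each stop codon, its first frame-aligned
--     # occurrence; the string is a potential gene iff it is codon-aligned, starts
--     # with ATG, and the earliest frame-aligned stop sits exactly on the last codon.
--     n = len(dna)
--     if n % 3 != 0 or not dna.startswith("ATG"):
--         return False
--     first = -1
--     for stop in ("TAA", "TAG", "TGA"):
--         j = dna.find(stop)
--         while j != -1 and j % 3 != 0:
--             j = dna.find(stop, j + 1)
--         if j != -1 and (first == -1 or j < first):
--             first = j
--     return first == n - 3
-- ===== Notes on version B (the rewrite author's own statement) =====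
-- stated objective: alternative
-- what changed: B replaces A's slice-every-codon scan (index loop filtered by i%3==0 plus endswith checks) by substring search: for each of the three stop codons it walks dna.find occurrences to the first frame-aligned one, takes the minimum over the stops, and decides by one arithmetic test that this earliest frame-aligned stop position is the last codon position.
import Mathlib
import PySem

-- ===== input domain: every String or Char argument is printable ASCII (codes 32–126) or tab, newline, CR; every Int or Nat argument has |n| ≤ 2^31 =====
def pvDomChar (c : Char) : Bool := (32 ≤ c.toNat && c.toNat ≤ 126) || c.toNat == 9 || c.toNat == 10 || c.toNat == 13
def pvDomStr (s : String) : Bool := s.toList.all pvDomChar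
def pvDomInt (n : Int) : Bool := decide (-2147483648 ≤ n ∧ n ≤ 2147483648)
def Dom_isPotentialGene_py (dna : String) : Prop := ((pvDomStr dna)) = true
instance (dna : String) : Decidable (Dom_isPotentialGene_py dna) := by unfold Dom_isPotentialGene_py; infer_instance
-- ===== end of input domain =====

-- B decides via substring search: the first frame-aligned stop-codon occurrence
-- (located with str.find per stop, minimised over the three stops) must be the last
-- codon; this replaces A's slice-every-codon scan. Same O(n) cost ('alternative').

-- ===== PORT A =====
def isPotentialGene_py (dna : String) : Bool :=
  if PySem.Int.mod (PySem.Str.len dna) 3 != 0 then false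
  else if !(PySem.Chars.startswith dna.toList "ATG".toList) then false
  else if (PySem.List.pyRange 0 (PySem.Str.len dna - 3) 1).any (fun i =>
      PySem.Int.mod i 3 == 0 &&
      (let codon := PySem.Chars.slice dna.toList (some i) (some (i + 3))
       codon == "TAA".toList || codon == "TAG".toList || codon == "TGA".toList))
  then false
  else (PySem.Chars.endswith dna.toList "TAA".toList
        || PySem.Chars.endswith dna.toList "TAG".toList
        || PySem.Chars.endswith dna.toList "TGA".toList)

-- ===== PORT B =====
-- the `while j != -1 and j % 3 != 0: j = dna.find(stop, j + 1)` loop of Source B;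
-- fuel (length+1, supplied at the call site) only makes the recursion total
def pvAlignLoop (s stop : List Char) (fuel : Nat) (j : Int) : Int :=
  match fuel with
  | 0 => j
  | fuel + 1 =>
    if j != -1 && PySem.Int.mod j 3 != 0 then
      pvAlignLoop s stop fuel (PySem.Chars.findFrom s stop (j + 1) none)
    else j

-- the `if j != -1 and (first == -1 or j < first): first = j` body of Source B's for-loop
def pvStep (first j : Int) : Int :=
  if j != -1 && (first == -1 || j < first) then j else first

def isPotentialGene_py_alt (dna : String) : Bool :=
  let s := dna.toList
  let n : Int := PySem.Str.len dna
  if PySem.Int.mod n 3 != 0 || !(PySem.Chars.startswith s "ATG".toList) then false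
  else
    let first := ["TAA".toList, "TAG".toList, "TGA".toList].foldl
      (fun first stop =>
        pvStep first (pvAlignLoop s stop (s.length + 1) (PySem.Chars.find s stop))) (-1)
    first == n - 3

-- ===== PRECONDITION & SPEC =====
def Spec_isPotentialGene_py (dna : String) (out : Bool) : Prop := out = isPotentialGene_py_alt dna
instance (dna : String) (out : Bool) : Decidable (Spec_isPotentialGene_py dna out) := by unfold Spec_isPotentialGene_py; infer_instance

-- ===== CLAIM (what is proved, stated in full; the proofs are below) =====
def Claim_equal_isPotentialGene_py : Prop := ∀ (dna : String), Dom_isPotentialGene_py dna → Spec_isPotentialGene_py dna (isPotentialGene_py dna)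

-- ===== LEMMAS AND PROOFS =====

-- loop invariant of pvAlignLoop: either no frame-aligned occurrence exists at all,
-- or j is an occurrence below which no frame-aligned occurrence exists
def pvInv (s stop : List Char) (j : Int) : Prop :=
  (j = -1 ∧ ∀ i : Nat, i % 3 = 0 → ¬ stop <+: s.drop i) ∨
  (0 ≤ j ∧ j.toNat ≤ s.length ∧ stop <+: s.drop j.toNat ∧
    ∀ i : Nat, i % 3 = 0 → i < j.toNat → ¬ stop <+: s.drop i)

-- result characterisation: -1 (no frame-aligned occurrence) or the FIRST one
def pvR (s stop : List Char) (r : Int) : Prop :=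
  (r = -1 ∧ ∀ i : Nat, i % 3 = 0 → ¬ stop <+: s.drop i) ∨
  (0 ≤ r ∧ r.toNat % 3 = 0 ∧ stop <+: s.drop r.toNat ∧
    ∀ i : Nat, i % 3 = 0 → i < r.toNat → ¬ stop <+: s.drop i)

theorem pvPrefix_drop_of_ge (s stop : List Char) (k i : Nat) (hki : k ≤ i)
    (h : stop <+: s.drop i) : stop <:+: s.drop k := by
  have : s.drop i = (s.drop k).drop (i - k) := by
    rw [List.drop_drop]; congr 1; omega
  rw [this] at h
  exact h.isInfix.trans (List.drop_suffix _ _).isInfix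

theorem pvPrefix_drop_lt_length (s stop : List Char) (i : Nat) (hst : stop ≠ [])
    (h : stop <+: s.drop i) : i < s.length := by
  have h1 : stop.length ≤ (s.drop i).length := h.length_le
  have h2 : 0 < stop.length := List.length_pos_iff.mpr hst
  rw [List.length_drop] at h1
  omega

theorem pvAlignLoop_neg_one (s stop : List Char) (fuel : Nat) :
    pvAlignLoop s stop fuel (-1) = -1 := by
  cases fuel <;> simp [pvAlignLoop]

theorem pvLoop_spec (s stop : List Char) (hst : stop ≠ []) :
    ∀ (fuel : Nat) (j : Int), pvInv s stop j → s.length + 1 ≤ j.toNat + fuel →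
      pvR s stop (pvAlignLoop s stop fuel j) := by
  intro fuel
  induction fuel with
  | zero =>
    intro j hinv hfuel
    rcases hinv with ⟨hj, _⟩ | ⟨_, hle, _, _⟩
    · subst hj; simp at hfuel
    · omega
  | succ fuel ih =>
    intro j hinv hfuel
    by_cases hg : (j != -1 && PySem.Int.mod j 3 != 0) = true
    · -- loop continues: j is a misaligned occurrence
      simp only [pvAlignLoop, hg, if_true]
      rcases hinv with ⟨hj, _⟩ | ⟨hj0, hjle, hocc, hmin⟩
      · subst hj; simp at hg
      · simp only [Bool.and_eq_true, bne_iff_ne, ne_eq] at hg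
        obtain ⟨_, hmod⟩ := hg
        set k := j.toNat with hk
        have hjk : j = (k : Int) := by omega
        have hmemod : PySem.Int.mod j 3 = j % 3 :=
          PySem.Int.mod_eq_emod_of_pos (by norm_num)
        have hkmod : k % 3 ≠ 0 := by
          intro h0
          apply hmod
          rw [hmemod]
          omega
        have hklt : k < s.length := pvPrefix_drop_lt_length s stop k hst hocc
        have hk1 : k + 1 ≤ s.length := by omega
        have hcast : j + 1 = ((k + 1 : Nat) : Int) := by omega
        rw [hcast]
        set j' := PySem.Chars.findFrom s stop ((k + 1 : Nat) : Int) none with hj'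
        by_cases hne : j' = -1
        · -- no occurrence at or after k+1: no frame-aligned occurrence at all
          rw [hne, pvAlignLoop_neg_one]
          left
          refine ⟨rfl, fun i hi3 hpre => ?_⟩
          rcases lt_trichotomy i k with hik | hik | hik
          · exact hmin i hi3 hik hpre
          · subst hik; exact hkmod hi3
          · have hnone := (PySem.Chars.findFrom_natCast_eq_neg_one_iff s stop (k + 1) hk1).mp hne
            exact hnone (pvPrefix_drop_of_ge s stop (k + 1) i (by omega) hpre)
        · obtain ⟨hge, hocc', hmin'⟩ := PySem.Chars.findFrom_natCast_spec s stop (k + 1) hk1 hne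
          have hj'0 : 0 ≤ j' := le_trans (by positivity) hge
          have hj'lt : j'.toNat < s.length := pvPrefix_drop_lt_length s stop j'.toNat hst hocc'
          have hj'ge : k + 1 ≤ j'.toNat := by omega
          apply ih
          · right
            refine ⟨hj'0, by omega, hocc', fun i hi3 hilt hpre => ?_⟩
            rcases lt_trichotomy i k with hik | hik | hik
            · exact hmin i hi3 hik hpre
            · subst hik; exact hkmod hi3
            · exact hmin' i (by omega) hilt hpre
          · omega
    · have hgf : (j != -1 && PySem.Int.mod j 3 != 0) = false := by
        simpa using hg
      simp only [pvAlignLoop, hgf, Bool.false_eq_true, if_false]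
      rcases hinv with ⟨hj, hno⟩ | ⟨hj0, _, hocc, hmin⟩
      · exact Or.inl ⟨hj, hno⟩
      · right
        simp only [Bool.and_eq_true, bne_iff_ne, ne_eq, not_and, not_not] at hg
        have hne : j ≠ -1 := by omega
        have hmod := hg hne
        refine ⟨hj0, ?_, hocc, hmin⟩
        rw [PySem.Int.mod_eq_emod_of_pos (by norm_num)] at hmod
        omega

theorem pvFirstAligned (s stop : List Char) (hst : stop ≠ []) :
    pvR s stop (pvAlignLoop s stop (s.length + 1) (PySem.Chars.find s stop)) := by
  set f := PySem.Chars.find s stop with hf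
  by_cases hne : f = -1
  · rw [hne, pvAlignLoop_neg_one]
    left
    refine ⟨rfl, fun i _ hpre => ?_⟩
    exact (PySem.Chars.find_eq_neg_one_iff s stop).mp hne
      (by simpa using pvPrefix_drop_of_ge s stop 0 i (Nat.zero_le i) hpre)
  · have hf0 : 0 ≤ f := by
      have := PySem.Chars.neg_one_le_find s stop
      omega
    obtain ⟨hocc, hmin⟩ := PySem.Chars.find_spec hf0
    have hle := PySem.Chars.find_le_length s stop
    apply pvLoop_spec s stop hst
    · right
      exact ⟨hf0, by omega, hocc, fun i _ hilt hpre => hmin i hilt hpre⟩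
    · omega

-- pvStep facts
theorem pvStep_le_right (first j : Int) (h : j ≠ -1) :
    pvStep first j ≠ -1 ∧ pvStep first j ≤ j := by
  unfold pvStep
  by_cases hc : (j != -1 && (first == -1 || j < first)) = true
  · rw [if_pos hc]; exact ⟨h, le_refl j⟩
  · rw [if_neg hc]
    simp only [Bool.and_eq_true, Bool.or_eq_true, bne_iff_ne, ne_eq, beq_iff_eq,
      decide_eq_true_eq, not_and, not_or, not_lt] at hc
    obtain ⟨h1, h2⟩ := hc h
    exact ⟨h1, h2⟩

theorem pvStep_le_left (first j : Int) (h : first ≠ -1) :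
    pvStep first j ≠ -1 ∧ pvStep first j ≤ first := by
  unfold pvStep
  by_cases hc : (j != -1 && (first == -1 || j < first)) = true
  · rw [if_pos hc]
    simp only [Bool.and_eq_true, Bool.or_eq_true, bne_iff_ne, ne_eq, beq_iff_eq,
      decide_eq_true_eq] at hc
    rcases hc with ⟨hj, hf | hf⟩
    · exact absurd hf h
    · exact ⟨hj, le_of_lt hf⟩
  · rw [if_neg hc]; exact ⟨h, le_refl first⟩

theorem pvStep_cases (m first j : Int) (hm : 0 ≤ m)
    (hf : first = -1 ∨ first = m) (hj : j = -1 ∨ j = m) :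
    (pvStep first j = -1 ∨ pvStep first j = m) ∧
      ((first = m ∨ j = m) → pvStep first j = m) := by
  unfold pvStep
  rcases hf with hf | hf <;> rcases hj with hj | hj <;> subst hf <;> subst hj <;>
    constructor <;> simp <;> omega


-- length-3 slice at an in-range codon start
theorem pvSlice3 (s : List Char) (j : Nat) :
    PySem.Chars.slice s (some ((j : Nat) : Int)) (some (((j : Nat) : Int) + 3))
      = (s.drop j).take 3 := by
  have h3 : ((3 : Int)) = ((3 : Nat) : Int) := by norm_cast
  simp only [PySem.Chars.slice_eq_listSlice, h3, PySem.List.slice_natCast_add]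

-- A's filtered middle loop holds iff some stop has a frame-aligned occurrence strictly before the last codon
theorem pvMid_eq (s : List Char) (stop : List Char) (hlen : stop.length = 3) (i : Nat) :
    
    ((s.drop i).take 3 = stop ↔ stop <+: s.drop i) := by
  rw [List.prefix_iff_eq_take, hlen]
  exact eq_comm

-- endswith a length-3 pattern on a length-≥3 string is a prefix of drop (n-3)
theorem pvEnds_iff (s stop : List Char) (hlen : stop.length = 3) :
    (PySem.Chars.endswith s stop = true ↔ stop <+: s.drop (s.length - 3)) := by
  rw [PySem.Chars.endswith_iff, List.suffix_iff_eq_drop, hlen]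
  constructor
  · intro h; rw [← h]
  · intro h
    have hl : (s.drop (s.length - 3)).length ≤ stop.length := by
      rw [List.length_drop, hlen]; omega
    exact h.eq_of_length_le hl

-- classification of the loop result r for one stop codon, from pvR and the
-- middle/end occurrence picture of the string (n % 3 = 0)
theorem pvRa (s stop : List Char) (hlen : stop.length = 3) (hn3 : s.length % 3 = 0)
    (r : Int) (hR : pvR s stop r) :
    ((¬ (∃ i : Nat, i % 3 = 0 ∧ i < s.length - 3 ∧ stop <+: s.drop i) ∧
        ¬ stop <+: s.drop (s.length - 3)) → r = -1) ∧
    ((¬ (∃ i : Nat, i % 3 = 0 ∧ i < s.length - 3 ∧ stop <+: s.drop i) ∧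
        stop <+: s.drop (s.length - 3)) → r = ((s.length - 3 : Nat) : Int)) ∧
    ((∃ i : Nat, i % 3 = 0 ∧ i < s.length - 3 ∧ stop <+: s.drop i) →
        r ≠ -1 ∧ r < ((s.length - 3 : Nat) : Int)) := by
  have hub : ∀ k : Nat, stop <+: s.drop k → k + 3 ≤ s.length := by
    intro k hk
    have h1 := hk.length_le
    rw [List.length_drop, hlen] at h1
    omega
  refine ⟨?_, ?_, ?_⟩
  · rintro ⟨hnm, hne⟩
    rcases hR with ⟨hr, _⟩ | ⟨h0, hal, hocc, _⟩
    · exact hr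
    · exfalso
      have hk3 := hub r.toNat hocc
      rcases Nat.lt_or_ge r.toNat (s.length - 3) with hlt | hge
      · exact hnm ⟨r.toNat, hal, hlt, hocc⟩
      · have : r.toNat = s.length - 3 := by omega
        rw [this] at hocc
        exact hne hocc
  · rintro ⟨hnm, he⟩
    have hs3 : 3 ≤ s.length := by
      have := hub (s.length - 3) he
      omega
    have hm3 : (s.length - 3) % 3 = 0 := by omega
    rcases hR with ⟨_, hno⟩ | ⟨h0, hal, hocc, _⟩
    · exact absurd he (hno (s.length - 3) hm3)
    · have hk3 := hub r.toNat hocc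
      rcases Nat.lt_or_ge r.toNat (s.length - 3) with hlt | hge
      · exact absurd ⟨r.toNat, hal, hlt, hocc⟩ hnm
      · have : r.toNat = s.length - 3 := by omega
        omega
  · rintro ⟨i, hi3, hilt, hpre⟩
    rcases hR with ⟨_, hno⟩ | ⟨h0, _, _, hmin⟩
    · exact absurd hpre (hno i hi3)
    · have : ¬ i < r.toNat := fun h => hmin i hi3 h hpre
      constructor
      · omega
      · omega

-- A's filtered middle loop as an existential over Nat codon starts
theorem pvMidAny (s : List Char) :
    ((PySem.List.pyRange 0 ((s.length : Int) - 3) 1).any (fun i =>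
        PySem.Int.mod i 3 == 0 &&
        (PySem.Chars.slice s (some i) (some (i + 3)) == "TAA".toList ||
         PySem.Chars.slice s (some i) (some (i + 3)) == "TAG".toList ||
         PySem.Chars.slice s (some i) (some (i + 3)) == "TGA".toList)) = true)
    ↔ ∃ i : Nat, i % 3 = 0 ∧ i < s.length - 3 ∧
        ("TAA".toList <+: s.drop i ∨ "TAG".toList <+: s.drop i ∨ "TGA".toList <+: s.drop i) := by
  rw [List.any_eq_true]
  constructor
  · rintro ⟨i, hi, hp⟩
    rw [PySem.List.mem_pyRange_one] at hi
    obtain ⟨hi0, hilt⟩ := hi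
    have hik : i = ((i.toNat : Nat) : Int) := by omega
    simp only [Bool.and_eq_true, Bool.or_eq_true, beq_iff_eq] at hp
    obtain ⟨hm, hcod⟩ := hp
    rw [PySem.Int.mod_eq_emod_of_pos (by norm_num)] at hm
    refine ⟨i.toNat, by omega, by omega, ?_⟩
    rw [hik, pvSlice3] at hcod
    rcases hcod with (h | h) | h
    · exact Or.inl ((pvMid_eq s "TAA".toList (by decide) i.toNat).mp h)
    · exact Or.inr (Or.inl ((pvMid_eq s "TAG".toList (by decide) i.toNat).mp h))
    · exact Or.inr (Or.inr ((pvMid_eq s "TGA".toList (by decide) i.toNat).mp h))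
  · rintro ⟨i, hi3, hilt, hpre⟩
    refine ⟨((i : Nat) : Int), ?_, ?_⟩
    · rw [PySem.List.mem_pyRange_one]
      omega
    · simp only [Bool.and_eq_true, Bool.or_eq_true, beq_iff_eq]
      constructor
      · rw [PySem.Int.mod_eq_emod_of_pos (by norm_num)]
        omega
      · rw [pvSlice3]
        rcases hpre with h | h | h
        · exact Or.inl (Or.inl ((pvMid_eq s "TAA".toList (by decide) i).mpr h))
        · exact Or.inl (Or.inr ((pvMid_eq s "TAG".toList (by decide) i).mpr h))
        · exact Or.inr ((pvMid_eq s "TGA".toList (by decide) i).mpr h)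

theorem pvMain_list (s : List Char) :
    (if PySem.Int.mod ((s.length : Int)) 3 != 0 then false
     else if !(PySem.Chars.startswith s "ATG".toList) then false
     else if (PySem.List.pyRange 0 ((s.length : Int) - 3) 1).any (fun i =>
         PySem.Int.mod i 3 == 0 &&
         (PySem.Chars.slice s (some i) (some (i + 3)) == "TAA".toList ||
          PySem.Chars.slice s (some i) (some (i + 3)) == "TAG".toList ||
          PySem.Chars.slice s (some i) (some (i + 3)) == "TGA".toList))
     then false
     else (PySem.Chars.endswith s "TAA".toList
           || PySem.Chars.endswith s "TAG".toList
           || PySem.Chars.endswith s "TGA".toList))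
    =
    (if (PySem.Int.mod ((s.length : Int)) 3 != 0) || !(PySem.Chars.startswith s "ATG".toList) then false
     else
       (["TAA".toList, "TAG".toList, "TGA".toList].foldl
         (fun first stop =>
           pvStep first (pvAlignLoop s stop (s.length + 1) (PySem.Chars.find s stop))) (-1))
         == (s.length : Int) - 3) := by
  have hmc : PySem.Int.mod ((s.length : Int)) 3 = ((s.length % 3 : Nat) : Int) := by
    rw [PySem.Int.mod_eq_emod_of_pos (by norm_num)]
    omega
  by_cases hmod : s.length % 3 = 0
  · have hg1 : (PySem.Int.mod ((s.length : Int)) 3 != 0) = false := by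
      rw [hmc, hmod]; decide
    rw [hg1]
    simp only [Bool.false_or, Bool.false_eq_true, if_false]
    by_cases hsw : PySem.Chars.startswith s "ATG".toList = true
    · rw [hsw]
      simp only [Bool.not_true, Bool.false_eq_true, if_false]
      have hpre : "ATG".toList <+: s := (PySem.Chars.startswith_iff s "ATG".toList).mp hsw
      have hs3 : 3 ≤ s.length := by
        have := hpre.length_le
        simp at this
        omega
      have hcast3 : (s.length : Int) - 3 = ((s.length - 3 : Nat) : Int) := by omega
      simp only [List.foldl_cons, List.foldl_nil]
      set r1 := pvAlignLoop s "TAA".toList (s.length + 1) (PySem.Chars.find s "TAA".toList) with hr1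
      set r2 := pvAlignLoop s "TAG".toList (s.length + 1) (PySem.Chars.find s "TAG".toList) with hr2
      set r3 := pvAlignLoop s "TGA".toList (s.length + 1) (PySem.Chars.find s "TGA".toList) with hr3
      have hRa1 := pvRa s "TAA".toList (by decide) hmod r1 (pvFirstAligned s "TAA".toList (by decide))
      have hRa2 := pvRa s "TAG".toList (by decide) hmod r2 (pvFirstAligned s "TAG".toList (by decide))
      have hRa3 := pvRa s "TGA".toList (by decide) hmod r3 (pvFirstAligned s "TGA".toList (by decide))
      by_cases hM : ∃ i : Nat, i % 3 = 0 ∧ i < s.length - 3 ∧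
          ("TAA".toList <+: s.drop i ∨ "TAG".toList <+: s.drop i ∨ "TGA".toList <+: s.drop i)
      · rw [if_pos ((pvMidAny s).mpr hM)]
        symm
        rw [beq_eq_false_iff_ne, hcast3]
        obtain ⟨i, hi3, hilt, hp⟩ := hM
        rcases hp with hp | hp | hp
        · obtain ⟨hne1, hlt1⟩ := hRa1.2.2 ⟨i, hi3, hilt, hp⟩
          obtain ⟨ha1, hb1⟩ := pvStep_le_right (-1) r1 hne1
          obtain ⟨ha2, hb2⟩ := pvStep_le_left (pvStep (-1) r1) r2 ha1
          obtain ⟨ha3, hb3⟩ := pvStep_le_left (pvStep (pvStep (-1) r1) r2) r3 ha2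
          omega
        · obtain ⟨hne2, hlt2⟩ := hRa2.2.2 ⟨i, hi3, hilt, hp⟩
          obtain ⟨ha2, hb2⟩ := pvStep_le_right (pvStep (-1) r1) r2 hne2
          obtain ⟨ha3, hb3⟩ := pvStep_le_left (pvStep (pvStep (-1) r1) r2) r3 ha2
          omega
        · obtain ⟨hne3, hlt3⟩ := pvStep_le_right (pvStep (pvStep (-1) r1) r2) r3 ((hRa3.2.2 ⟨i, hi3, hilt, hp⟩).1)
          have := (hRa3.2.2 ⟨i, hi3, hilt, hp⟩).2
          omega
      · rw [if_neg (fun h => hM ((pvMidAny s).mp h))]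
        have hm1 : ¬ ∃ i : Nat, i % 3 = 0 ∧ i < s.length - 3 ∧ "TAA".toList <+: s.drop i :=
          fun ⟨i, a, b, c⟩ => hM ⟨i, a, b, Or.inl c⟩
        have hm2 : ¬ ∃ i : Nat, i % 3 = 0 ∧ i < s.length - 3 ∧ "TAG".toList <+: s.drop i :=
          fun ⟨i, a, b, c⟩ => hM ⟨i, a, b, Or.inr (Or.inl c)⟩
        have hm3 : ¬ ∃ i : Nat, i % 3 = 0 ∧ i < s.length - 3 ∧ "TGA".toList <+: s.drop i :=
          fun ⟨i, a, b, c⟩ => hM ⟨i, a, b, Or.inr (Or.inr c)⟩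
        rw [hcast3]
        set m : Int := ((s.length - 3 : Nat) : Int) with hmdef
        have hm0 : 0 ≤ m := by positivity
        have hv1 : r1 = -1 ∨ r1 = m := by
          by_cases he : "TAA".toList <+: s.drop (s.length - 3)
          · exact Or.inr (hRa1.2.1 ⟨hm1, he⟩)
          · exact Or.inl (hRa1.1 ⟨hm1, he⟩)
        have hv2 : r2 = -1 ∨ r2 = m := by
          by_cases he : "TAG".toList <+: s.drop (s.length - 3)
          · exact Or.inr (hRa2.2.1 ⟨hm2, he⟩)
          · exact Or.inl (hRa2.1 ⟨hm2, he⟩)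
        have hv3 : r3 = -1 ∨ r3 = m := by
          by_cases he : "TGA".toList <+: s.drop (s.length - 3)
          · exact Or.inr (hRa3.2.1 ⟨hm3, he⟩)
          · exact Or.inl (hRa3.1 ⟨hm3, he⟩)
        have hc1 := pvStep_cases m (-1) r1 hm0 (Or.inl rfl) hv1
        have hc2 := pvStep_cases m (pvStep (-1) r1) r2 hm0 hc1.1 hv2
        have hc3 := pvStep_cases m (pvStep (pvStep (-1) r1) r2) r3 hm0 hc2.1 hv3
        by_cases hE : "TAA".toList <+: s.drop (s.length - 3) ∨ "TAG".toList <+: s.drop (s.length - 3) ∨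
            "TGA".toList <+: s.drop (s.length - 3)
        · have hlhs : (PySem.Chars.endswith s "TAA".toList || PySem.Chars.endswith s "TAG".toList
              || PySem.Chars.endswith s "TGA".toList) = true := by
            simp only [Bool.or_eq_true, pvEnds_iff s "TAA".toList (by decide),
              pvEnds_iff s "TAG".toList (by decide), pvEnds_iff s "TGA".toList (by decide)]
            rcases hE with h | h | h
            · exact Or.inl (Or.inl h)
            · exact Or.inl (Or.inr h)
            · exact Or.inr h
          rw [hlhs]
          have hfold : pvStep (pvStep (pvStep (-1) r1) r2) r3 = m := by
            rcases hE with h | h | h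
            · have e1 : r1 = m := hRa1.2.1 ⟨hm1, h⟩
              exact hc3.2 (Or.inl (hc2.2 (Or.inl (hc1.2 (Or.inr e1)))))
            · have e2 : r2 = m := hRa2.2.1 ⟨hm2, h⟩
              exact hc3.2 (Or.inl (hc2.2 (Or.inr e2)))
            · have e3 : r3 = m := hRa3.2.1 ⟨hm3, h⟩
              exact hc3.2 (Or.inr e3)
          rw [hfold]
          simp
        · have he1 : ¬ "TAA".toList <+: s.drop (s.length - 3) := fun h => hE (Or.inl h)
          have he2 : ¬ "TAG".toList <+: s.drop (s.length - 3) := fun h => hE (Or.inr (Or.inl h))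
          have he3 : ¬ "TGA".toList <+: s.drop (s.length - 3) := fun h => hE (Or.inr (Or.inr h))
          have hlhs : (PySem.Chars.endswith s "TAA".toList || PySem.Chars.endswith s "TAG".toList
              || PySem.Chars.endswith s "TGA".toList) = false := by
            simp only [Bool.or_eq_false_iff]
            refine ⟨⟨?_, ?_⟩, ?_⟩ <;> rw [Bool.eq_false_iff]
            · exact fun h => he1 ((pvEnds_iff s "TAA".toList (by decide)).mp h)
            · exact fun h => he2 ((pvEnds_iff s "TAG".toList (by decide)).mp h)
            · exact fun h => he3 ((pvEnds_iff s "TGA".toList (by decide)).mp h)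
          rw [hlhs, hRa1.1 ⟨hm1, he1⟩, hRa2.1 ⟨hm2, he2⟩, hRa3.1 ⟨hm3, he3⟩]
          have hfold : pvStep (pvStep (pvStep (-1 : Int) (-1)) (-1)) (-1) = -1 := by decide
          rw [hfold]
          symm
          rw [beq_eq_false_iff_ne]
          omega
    · have hswf : PySem.Chars.startswith s "ATG".toList = false := by
        rw [Bool.eq_false_iff]; exact hsw
      rw [hswf]
      simp
  · have hg1 : (PySem.Int.mod ((s.length : Int)) 3 != 0) = true := by
      rw [hmc]
      simp only [bne_iff_ne, ne_eq, Int.natCast_eq_zero]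
      omega
    rw [hg1]
    simp

theorem pvMain (dna : String) :
    isPotentialGene_py dna = isPotentialGene_py_alt dna := by
  unfold isPotentialGene_py isPotentialGene_py_alt
  simp only [PySem.Str.len_eq]
  exact pvMain_list dna.toList

-- ===== VERDICT (by name: the statement is the Claim_ definition above) =====
theorem isPotentialGene_py_spec : Claim_equal_isPotentialGene_py := by
  intro dna _
  unfold Spec_isPotentialGene_py
  exact pvMain dna
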